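-- pv_equiv track=rewrite | github.com/IorenzoLF/Le_Refuge | Le_refuge/arc_agi_refuge/resoudre_hybride_zones.py | identifier_zones_bord
-- ===== SOURCE A (Python) =====
-- def identifier_zones_bord(grid):
--     """Identifier zones bord"""
--     rows = len(grid)
--     cols = len(grid[0])
--     visited = set()
--
--     bord_positions = []
--     for j in range(cols):
--         bord_positions.append((0, j))
--         bord_positions.append((rows-1, j))
--     for i in range(1, rows-1):
--         bord_positions.append((i, 0))
--         bord_positions.append((i, cols-1))
--
--     zones_bord = set()
--
--     for start_i, start_j in bord_positions:
--         if grid[start_i][start_j] == 0 and (start_i, start_j) not in visited: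
--             zone = flood_fill(grid, start_i, start_j, visited)
--             zones_bord.update(zone)
--
--     return zones_bord
--
-- def flood_fill(grid, start_i, start_j, visited):
--     """Flood fill"""
--     rows = len(grid)
--     cols = len(grid[0])
--     zone = set()
--     pile = [(start_i, start_j)]
--
--     while pile:
--         i, j = pile.pop()
--         if (i < 0 or i >= rows or j < 0 or j >= cols or
--             (i, j) in visited or grid[i][j] != 0):
--             continue
--
--         visited.add((i, j))
--         zone.add((i, j))
--
--         pile.extend([(i-1, j), (i+1, j), (i, j-1), (i, j+1)])
--
--     return zone
-- ===== SOURCE B (Python) =====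
-- def identifier_zones_bord(grid):
--     """Identifier zones bord: zero cells connected to the border, by whole-grid
--     saturation sweeps (fixpoint iteration) instead of per-seed flood fill."""
--     rows = len(grid)
--     cols = len(grid[0])
--
--     marked = set()
--     for i in range(rows):
--         for j in range(cols):
--             if grid[i][j] == 0 and (i == 0 or i == rows - 1 or j == 0 or j == cols - 1):
--                 marked.add((i, j))
--
--     while True:
--         added = set()
--         for i in range(rows):
--             for j in range(cols):
--                 if grid[i][j] == 0 and (i, j) not in marked and (
--                         (i - 1, j) in marked or (i + 1, j) in marked
--                         or (i, j - 1) in marked or (i, j + 1) in marked):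
--                     added.add((i, j))
--         if not added:
--             return marked
--         marked |= added
-- ===== Notes on version B (the rewrite author's own statement) =====
-- stated objective: alternative
-- what changed: Replaces the per-seed stack-based flood fill over an explicit border-position list by a whole-grid fixpoint saturation: mark all border zeros in one sweep, then repeatedly sweep the grid adding zero cells adjacent to marked cells until no cell is added.
import Mathlib
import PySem

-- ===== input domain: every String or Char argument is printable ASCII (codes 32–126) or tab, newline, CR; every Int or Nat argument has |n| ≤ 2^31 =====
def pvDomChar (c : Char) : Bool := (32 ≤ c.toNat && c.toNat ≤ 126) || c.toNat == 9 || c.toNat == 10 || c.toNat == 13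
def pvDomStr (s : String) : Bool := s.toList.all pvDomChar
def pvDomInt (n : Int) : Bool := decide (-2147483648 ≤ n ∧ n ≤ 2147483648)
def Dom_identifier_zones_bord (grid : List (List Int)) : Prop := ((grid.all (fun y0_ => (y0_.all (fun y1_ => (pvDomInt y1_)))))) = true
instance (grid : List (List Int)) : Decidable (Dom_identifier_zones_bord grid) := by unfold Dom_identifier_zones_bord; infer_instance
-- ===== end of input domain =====

-- B replaces A's per-seed stack flood fill by whole-grid saturation sweeps to a fixpoint (objective:
-- alternative).  Python's identifier_zones_bord returns a SET (unordered); both ports return its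
-- canonical sorted-list representation, so set equality becomes list equality.

-- Shared accessors (len(grid), len(grid[0]), grid[i][j] with Python indexing).
def pvRows (grid : List (List Int)) : Int := (grid.length : Int)
def pvCols (grid : List (List Int)) : Int := ((PySem.List.pyGetD grid 0 []).length : Int)
def pvCell (grid : List (List Int)) (i j : Int) : Option Int :=
  (PySem.List.pyGet? grid i).bind (fun row => PySem.List.pyGet? row j)

-- The four neighbours pushed by flood_fill, head = the one Python pops first.
def pvNbrs (c : Int × Int) : List (Int × Int) :=
  [(c.1, c.2 + 1), (c.1, c.2 - 1), (c.1 + 1, c.2), (c.1 - 1, c.2)]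

-- All in-bounds cells (used only in termination measures and proofs).
def pvAll (grid : List (List Int)) : List (Int × Int) :=
  (PySem.List.pyRange 0 (pvRows grid) 1).flatMap
    (fun i => (PySem.List.pyRange 0 (pvCols grid) 1).map (fun j => (i, j)))

lemma pv_mem_pvAll (grid : List (List Int)) (c : Int × Int) :
    c ∈ pvAll grid ↔ 0 ≤ c.1 ∧ c.1 < pvRows grid ∧ 0 ≤ c.2 ∧ c.2 < pvCols grid := by
  rcases c with ⟨i, j⟩
  simp only [pvAll, List.mem_flatMap, List.mem_map, PySem.List.mem_pyRange_one]
  constructor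
  · rintro ⟨a, ha, b, hb, h⟩
    rw [Prod.mk.injEq] at h
    obtain ⟨rfl, rfl⟩ := h
    exact ⟨ha.1, ha.2, hb.1, hb.2⟩
  · rintro ⟨h1, h2, h3, h4⟩; exact ⟨i, ⟨h1, h2⟩, j, ⟨h3, h4⟩, rfl⟩

-- filter-length facts for the termination measures
lemma pv_filter_le {α} (l : List α) (p q : α → Bool) (h : ∀ x, p x = true → q x = true) :
    (l.filter p).length ≤ (l.filter q).length := by
  induction l with
  | nil => simp
  | cons a t ih =>
    by_cases hp : p a = true
    · simp [hp, h a hp]; omega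
    · simp only [List.filter_cons, Bool.not_eq_true] at *
      rw [hp]
      by_cases hq : q a = true <;> simp [hq] <;> omega

lemma pv_filter_lt {α} (l : List α) (p q : α → Bool) (h : ∀ x, p x = true → q x = true)
    (c : α) (hc : c ∈ l) (hq : q c = true) (hp : p c = false) :
    (l.filter p).length < (l.filter q).length := by
  induction l with
  | nil => simp at hc
  | cons a t ih =>
    rcases List.mem_cons.mp hc with rfl | hct
    · have h1 : (t.filter p).length ≤ (t.filter q).length := pv_filter_le t p q h
      simp [hp, hq]; omega
    · have h1 := ih hct
      by_cases hpa : p a = true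
      · simp [hpa, h a hpa]; omega
      · simp only [Bool.not_eq_true] at hpa
        rw [List.filter_cons, List.filter_cons, hpa]
        by_cases hqa : q a = true <;> simp [hqa] <;> omega

-- generic membership / nodup of a set-accumulating fold (cited by the ports' termination proofs too)
lemma pv_mem_foldl {α β} [BEq α] [LawfulBEq α] (step : PySem.Set α → β → PySem.Set α)
    (Q : β → α → Prop) (h : ∀ m b x, x ∈ step m b ↔ x ∈ m ∨ Q b x) :
    ∀ (l : List β) (s : PySem.Set α) (x : α),
      x ∈ l.foldl step s ↔ x ∈ s ∨ ∃ b ∈ l, Q b x := by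
  intro l
  induction l with
  | nil => simp
  | cons a t ih =>
    intro s x
    simp only [List.foldl_cons, ih, h, List.mem_cons]
    constructor
    · rintro (((hs | hq) | ⟨b, hb, hqb⟩))
      · exact Or.inl hs
      · exact Or.inr ⟨a, Or.inl rfl, hq⟩
      · exact Or.inr ⟨b, Or.inr hb, hqb⟩
    · rintro (hs | ⟨b, (rfl | hb), hqb⟩)
      · exact Or.inl (Or.inl hs)
      · exact Or.inl (Or.inr hqb)
      · exact Or.inr ⟨b, hb, hqb⟩

-- ===== PORT A =====
-- flood_fill: the Python stack loop; 'visited' is mutated in place, so the port returns (zone, visited).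
def pvFlood (grid : List (List Int)) (pile : List (Int × Int))
    (visited zone : PySem.Set (Int × Int)) : PySem.Set (Int × Int) × PySem.Set (Int × Int) :=
  match pile with
  | [] => (zone, visited)
  | c :: rest =>
    if c.1 < 0 ∨ pvRows grid ≤ c.1 ∨ c.2 < 0 ∨ pvCols grid ≤ c.2 ∨ c ∈ visited ∨ pvCell grid c.1 c.2 ≠ some 0 then
      pvFlood grid rest visited zone
    else
      pvFlood grid (pvNbrs c ++ rest) (PySem.Set.add visited c) (PySem.Set.add zone c)
termination_by ((((pvAll grid).filter (fun x => decide (x ∉ visited))).length, pile.length))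
decreasing_by
  · exact Prod.Lex.right _ (by simp)
  · rename_i hcond
    push Not at hcond
    apply Prod.Lex.left
    refine pv_filter_lt _ _ _ ?_ c ?_ ?_ ?_
    · intro x hx
      simp only [decide_eq_true_eq, PySem.Set.mem_add] at *
      tauto
    · exact (pv_mem_pvAll grid c).mpr ⟨by omega, by omega, by omega, by omega⟩
    · simp only [decide_eq_true_eq]; exact hcond.2.2.2.2.1
    · simp [PySem.Set.mem_add]

def identifier_zones_bord (grid : List (List Int)) : List (Int × Int) :=
  let rows := pvRows grid
  let cols := pvCols grid
  let bord1 := (PySem.List.pyRange 0 cols 1).foldl (fun acc j => acc ++ [((0 : Int), j), (rows - 1, j)]) []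
  let bord := (PySem.List.pyRange 1 (rows - 1) 1).foldl (fun acc i => acc ++ [(i, (0 : Int)), (i, cols - 1)]) bord1
  let st := bord.foldl (fun (st : PySem.Set (Int × Int) × PySem.Set (Int × Int)) p =>
      if pvCell grid p.1 p.2 = some 0 ∧ p ∉ st.1 then
        let z := pvFlood grid [p] st.1 PySem.Set.empty
        (z.2, PySem.Set.update st.2 z.1)
      else st) (PySem.Set.empty, PySem.Set.empty)
  -- Python returns the unordered set; canonical sorted representation
  PySem.List.sorted st.2 (fun p => toLex p)

-- ===== PORT B =====
-- one full sweep marking border zeros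
def pvSweepInit (grid : List (List Int)) : PySem.Set (Int × Int) :=
  (PySem.List.pyRange 0 (pvRows grid) 1).foldl (fun m i =>
    (PySem.List.pyRange 0 (pvCols grid) 1).foldl (fun m j =>
      if pvCell grid i j = some 0 ∧ (i = 0 ∨ i = pvRows grid - 1 ∨ j = 0 ∨ j = pvCols grid - 1)
      then PySem.Set.add m (i, j) else m) m) PySem.Set.empty

-- one full sweep collecting unmarked zeros with a marked neighbour
def pvSweepAdd (grid : List (List Int)) (marked : PySem.Set (Int × Int)) : PySem.Set (Int × Int) :=
  (PySem.List.pyRange 0 (pvRows grid) 1).foldl (fun s i =>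
    (PySem.List.pyRange 0 (pvCols grid) 1).foldl (fun s j =>
      if pvCell grid i j = some 0 ∧ (i, j) ∉ marked ∧
          ((i - 1, j) ∈ marked ∨ (i + 1, j) ∈ marked ∨ (i, j - 1) ∈ marked ∨ (i, j + 1) ∈ marked)
      then PySem.Set.add s (i, j) else s) s) PySem.Set.empty

-- weak characterisation of a sweep, needed by pvSaturate's termination proof
lemma pv_sweepAdd_sub (grid : List (List Int)) (M : PySem.Set (Int × Int)) (x : Int × Int)
    (hx : x ∈ pvSweepAdd grid M) : x ∈ pvAll grid ∧ x ∉ M := by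
  have := (pv_mem_foldl
    (fun s i => (PySem.List.pyRange 0 (pvCols grid) 1).foldl (fun s j =>
      if pvCell grid i j = some 0 ∧ (i, j) ∉ M ∧
          ((i - 1, j) ∈ M ∨ (i + 1, j) ∈ M ∨ (i, j - 1) ∈ M ∨ (i, j + 1) ∈ M)
      then PySem.Set.add s (i, j) else s) s)
    (fun i x => ∃ j ∈ PySem.List.pyRange 0 (pvCols grid) 1,
      (pvCell grid i j = some 0 ∧ (i, j) ∉ M ∧
        ((i - 1, j) ∈ M ∨ (i + 1, j) ∈ M ∨ (i, j - 1) ∈ M ∨ (i, j + 1) ∈ M)) ∧ x = (i, j))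
    (fun m i x => pv_mem_foldl _
      (fun j x => (pvCell grid i j = some 0 ∧ (i, j) ∉ M ∧
        ((i - 1, j) ∈ M ∨ (i + 1, j) ∈ M ∨ (i, j - 1) ∈ M ∨ (i, j + 1) ∈ M)) ∧ x = (i, j))
      (fun m j x => by split_ifs with h
                       · simp [PySem.Set.mem_add]; tauto
                       · simp; tauto) _ m x)
    (PySem.List.pyRange 0 (pvRows grid) 1) PySem.Set.empty x).mp hx
  rcases this with h | ⟨i, hi, j, hj, ⟨hcell, hnM, _⟩, rfl⟩
  · simp [PySem.Set.empty] at h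
  · rw [PySem.List.mem_pyRange_one] at hi hj
    exact ⟨(pv_mem_pvAll grid (i, j)).mpr ⟨hi.1, hi.2, hj.1, hj.2⟩, hnM⟩

def pvSaturate (grid : List (List Int)) (marked : PySem.Set (Int × Int)) : PySem.Set (Int × Int) :=
  let added := pvSweepAdd grid marked
  if added = [] then marked
  else pvSaturate grid (PySem.Set.union marked added)
termination_by (((pvAll grid).filter (fun x => decide (x ∉ marked))).length)
decreasing_by
  rename_i h
  rcases List.exists_mem_of_ne_nil _ h with ⟨c, hc⟩
  rcases pv_sweepAdd_sub grid marked c hc with ⟨hcall, hcnm⟩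
  refine pv_filter_lt _ _ _ ?_ c hcall ?_ ?_
  · intro x hx
    simp only [decide_eq_true_eq, PySem.Set.mem_union] at *
    tauto
  · simpa using hcnm
  · simp only [PySem.Set.mem_union, decide_eq_false_iff_not, not_not]
    exact Or.inr hc

def identifier_zones_bord_alt (grid : List (List Int)) : List (Int × Int) :=
  PySem.List.sorted (pvSaturate grid (pvSweepInit grid)) (fun p => toLex p)

-- ===== PRECONDITION & SPEC =====
-- Pre_ excludes exactly the inputs on which the Python A raises IndexError: the empty grid, grids
-- with some row shorter than the first row, and zero-width grids with an empty interior row.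
def Pre_identifier_zones_bord (grid : List (List Int)) : Prop :=
  grid ≠ [] ∧ (∀ row ∈ grid, grid.headI.length ≤ row.length) ∧
    (grid.headI.length = 0 → ∀ row ∈ grid.tail.dropLast, row ≠ [])
instance (grid : List (List Int)) : Decidable (Pre_identifier_zones_bord grid) := by
  unfold Pre_identifier_zones_bord; infer_instance

def pvWitness_identifier_zones_bord : List (List Int) := [[0, 1], [1, 0]]

def Spec_identifier_zones_bord (grid : List (List Int)) (out : List (Int × Int)) : Prop :=
  out = identifier_zones_bord_alt grid
instance (grid : List (List Int)) (out : List (Int × Int)) : Decidable (Spec_identifier_zones_bord grid out) := by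
  unfold Spec_identifier_zones_bord; infer_instance

-- ===== CLAIM (what is proved, stated in full; the proofs are below) =====
def Claim_equal_identifier_zones_bord : Prop := ∀ (grid : List (List Int)), Dom_identifier_zones_bord grid → Pre_identifier_zones_bord grid → Spec_identifier_zones_bord grid (identifier_zones_bord grid)

-- ===== LEMMAS AND PROOFS =====

lemma pv_nodup_foldl {α β} (step : PySem.Set α → β → PySem.Set α)
    (h : ∀ m b, m.Nodup → (step m b).Nodup) :
    ∀ (l : List β) (s : PySem.Set α), s.Nodup → (l.foldl step s).Nodup := by
  intro l
  induction l with
  | nil => intro s hs; simpa using hs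
  | cons a t ih => intro s hs; exact ih _ (h s a hs)

-- a cell is "ok" when it is in bounds and holds 0
def pvOk (grid : List (List Int)) (c : Int × Int) : Prop :=
  0 ≤ c.1 ∧ c.1 < pvRows grid ∧ 0 ≤ c.2 ∧ c.2 < pvCols grid ∧ pvCell grid c.1 c.2 = some 0

def pvAdj (c d : Int × Int) : Prop :=
  (c.1 = d.1 ∧ (c.2 = d.2 + 1 ∨ d.2 = c.2 + 1)) ∨ (c.2 = d.2 ∧ (c.1 = d.1 + 1 ∨ d.1 = c.1 + 1))

lemma pvAdj_symm {c d : Int × Int} (h : pvAdj c d) : pvAdj d c := by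
  rcases c with ⟨a, b⟩; rcases d with ⟨x, y⟩; unfold pvAdj at *; simp_all; omega

lemma pv_mem_pvNbrs {c d : Int × Int} : d ∈ pvNbrs c ↔ pvAdj c d := by
  rcases c with ⟨a, b⟩; rcases d with ⟨x, y⟩
  simp [pvNbrs, pvAdj, Prod.ext_iff]; omega

-- reachability through zero cells, from seed list S, avoiding V
inductive pvRA (grid : List (List Int)) (V : (Int × Int) → Prop) (S : List (Int × Int)) : (Int × Int) → Prop
  | base {c} (hc : c ∈ S) (hok : pvOk grid c) (hv : ¬ V c) : pvRA grid V S c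
  | step {b c} (hb : pvRA grid V S b) (ha : pvAdj b c) (hok : pvOk grid c) (hv : ¬ V c) : pvRA grid V S c

lemma pvRA_nil {grid V x} (h : pvRA grid V [] x) : False := by
  induction h with
  | base hc _ _ => simp at hc
  | step _ _ _ _ ih => exact ih

lemma pvRA_mono_V {grid V V' S x} (hV : ∀ y, V' y → V y) (h : pvRA grid V S x) :
    pvRA grid V' S x := by
  induction h with
  | base hc hok hv => exact .base hc hok (fun hx => hv (hV _ hx))
  | step _ ha hok hv ih => exact .step ih ha hok (fun hx => hv (hV _ hx))

lemma pvRA_congr_V {grid V V' S x} (hV : ∀ y, V y ↔ V' y) :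
    pvRA grid V S x ↔ pvRA grid V' S x :=
  ⟨pvRA_mono_V (fun y hy => (hV y).mpr hy), pvRA_mono_V (fun y hy => (hV y).mp hy)⟩

lemma pvRA_mono_S {grid V S S' x} (hS : ∀ y, y ∈ S → y ∈ S') (h : pvRA grid V S x) :
    pvRA grid V S' x := by
  induction h with
  | base hc hok hv => exact .base (hS _ hc) hok hv
  | step _ ha hok hv ih => exact .step ih ha hok hv

lemma pvRA_append {grid V S T x} :
    pvRA grid V (S ++ T) x ↔ pvRA grid V S x ∨ pvRA grid V T x := by
  constructor
  · intro h
    induction h with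
    | base hc hok hv =>
      rcases List.mem_append.mp hc with h | h
      · exact Or.inl (.base h hok hv)
      · exact Or.inr (.base h hok hv)
    | step _ ha hok hv ih =>
      rcases ih with h | h
      · exact Or.inl (.step h ha hok hv)
      · exact Or.inr (.step h ha hok hv)
  · rintro (h | h)
    · exact pvRA_mono_S (fun y hy => List.mem_append.mpr (Or.inl hy)) h
    · exact pvRA_mono_S (fun y hy => List.mem_append.mpr (Or.inr hy)) h

lemma pvRA_skip {grid V S x} {c : Int × Int} (h : ¬ pvOk grid c ∨ V c) :
    pvRA grid V (c :: S) x ↔ pvRA grid V S x := by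
  constructor
  · intro hx
    induction hx with
    | base hc hok hv =>
      rcases List.mem_cons.mp hc with rfl | hc'
      · rcases h with h | h; exact absurd hok h; exact absurd h hv
      · exact .base hc' hok hv
    | step _ ha hok hv ih => exact .step ih ha hok hv
  · exact pvRA_mono_S (fun y hy => List.mem_cons.mpr (Or.inr hy))

lemma pvRA_visit {grid V S x} {c : Int × Int} (hok : pvOk grid c) (hv : ¬ V c) :
    pvRA grid V (c :: S) x ↔ (x = c ∨ pvRA grid (fun y => V y ∨ y = c) (pvNbrs c ++ S) x) := by
  constructor
  · intro hx
    induction hx with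
    | @base y hc hok' hv' =>
      rcases List.mem_cons.mp hc with rfl | hc'
      · exact Or.inl rfl
      · by_cases hxc : y = c
        · exact Or.inl hxc
        · exact Or.inr (.base (List.mem_append.mpr (Or.inr hc')) hok' (by tauto))
    | @step b y hb ha hok' hv' ih =>
      by_cases hyc : y = c
      · exact Or.inl hyc
      · rcases ih with rfl | hb'
        · exact Or.inr (.base (List.mem_append.mpr (Or.inl (pv_mem_pvNbrs.mpr ha))) hok' (by tauto))
        · exact Or.inr (.step hb' ha hok' (by tauto))
  · rintro (rfl | hx)
    · exact .base (List.mem_cons.mpr (Or.inl rfl)) hok hv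
    · induction hx with
      | base hc hok' hv' =>
        rcases List.mem_append.mp hc with h | h
        · exact .step (.base (List.mem_cons.mpr (Or.inl rfl)) hok hv) (pv_mem_pvNbrs.mp h) hok' (by tauto)
        · exact .base (List.mem_cons.mpr (Or.inr h)) hok' (by tauto)
      | step _ ha hok' hv' ih => exact .step ih ha hok' (by tauto)

def pvFalseP : (Int × Int) → Prop := fun _ => False

def pvClosed (grid : List (List Int)) (V : (Int × Int) → Prop) : Prop :=
  ∀ b c, V b → pvAdj b c → pvOk grid c → V c

lemma pvRA_absorb {grid V S x} (hcl : pvClosed grid V) :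
    (V x ∨ pvRA grid V S x) ↔ (V x ∨ pvRA grid pvFalseP S x) := by
  constructor
  · rintro (h | h)
    · exact Or.inl h
    · exact Or.inr (pvRA_mono_V (fun y hy => hy.elim) h)
  · rintro (h | h)
    · exact Or.inl h
    · induction h with
      | @base y hc hok hv =>
        by_cases hxv : V y
        · exact Or.inl hxv
        · exact Or.inr (.base hc hok hxv)
      | @step b y hb ha hok hv ih =>
        rcases ih with h | h
        · exact Or.inl (hcl _ _ h ha hok)
        · by_cases hyv : V y
          · exact Or.inl hyv
          · exact Or.inr (.step h ha hok hyv)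

lemma pvRA_closed_absorbs {grid : List (List Int)} {V : PySem.Set (Int × Int)}
    {S : List (Int × Int)} {x : Int × Int} (hcl : pvClosed grid (fun y => y ∈ V))
    (hS : ∀ s ∈ S, s ∈ V) (h : pvRA grid pvFalseP S x) : x ∈ V := by
  induction h with
  | base hc _ _ => exact hS _ hc
  | step _ ha hok ih_ ih => exact hcl _ _ ih ha hok

-- flood fill computes reachability avoiding the incoming visited set
lemma pvFlood_spec (grid : List (List Int)) :
    ∀ (pile : List (Int × Int)) (V Z : PySem.Set (Int × Int)),
      (∀ x, x ∈ (pvFlood grid pile V Z).1 ↔ x ∈ Z ∨ pvRA grid (· ∈ V) pile x) ∧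
      (∀ x, x ∈ (pvFlood grid pile V Z).2 ↔ x ∈ V ∨ pvRA grid (· ∈ V) pile x) := by
  intro pile V Z
  fun_induction pvFlood grid pile V Z with
  | case1 V Z =>
    refine ⟨fun x => ⟨Or.inl, ?_⟩, fun x => ⟨Or.inl, ?_⟩⟩ <;>
      rintro (h | h) <;> first | exact h | exact absurd h (fun h => pvRA_nil h)
  | case2 V Z c rest hcond ih =>
    have hskip : ¬ pvOk grid c ∨ c ∈ V := by
      rcases hcond with h | h | h | h | h | h
      · exact Or.inl (fun hok => by unfold pvOk at hok; omega)
      · exact Or.inl (fun hok => by unfold pvOk at hok; omega)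
      · exact Or.inl (fun hok => by unfold pvOk at hok; omega)
      · exact Or.inl (fun hok => by unfold pvOk at hok; omega)
      · exact Or.inr h
      · exact Or.inl (fun hok => h hok.2.2.2.2)
    refine ⟨fun x => ?_, fun x => ?_⟩
    · rw [ih.1 x, pvRA_skip hskip]
    · rw [ih.2 x, pvRA_skip hskip]
  | case3 V Z c rest hcond ih =>
    push Not at hcond
    obtain ⟨hb1, hb2, hb3, hb4, hvnot, hcell⟩ := hcond
    have hok : pvOk grid c := ⟨by omega, by omega, by omega, by omega, hcell⟩
    have hcongr : ∀ x, (x ∈ PySem.Set.add V c) ↔ ((fun y => y ∈ V ∨ y = c) x) := by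
      intro y; simp [PySem.Set.mem_add]
    refine ⟨fun x => ?_, fun x => ?_⟩
    · rw [ih.1 x, pvRA_visit hok hvnot, pvRA_congr_V hcongr]
      simp [PySem.Set.mem_add]
      tauto
    · rw [ih.2 x, pvRA_visit hok hvnot, pvRA_congr_V hcongr]
      simp [PySem.Set.mem_add]
      tauto

-- the outer loop's step function, and the border list, as the port computes them
def pvStepA (grid : List (List Int))
    (st : PySem.Set (Int × Int) × PySem.Set (Int × Int)) (p : Int × Int) :
    PySem.Set (Int × Int) × PySem.Set (Int × Int) :=
  if pvCell grid p.1 p.2 = some 0 ∧ p ∉ st.1 then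
    let z := pvFlood grid [p] st.1 PySem.Set.empty
    (z.2, PySem.Set.update st.2 z.1)
  else st

def pvBord (grid : List (List Int)) : List (Int × Int) :=
  (PySem.List.pyRange 1 (pvRows grid - 1) 1).foldl
    (fun acc i => acc ++ [(i, (0 : Int)), (i, pvCols grid - 1)])
    ((PySem.List.pyRange 0 (pvCols grid) 1).foldl
      (fun acc j => acc ++ [((0 : Int), j), (pvRows grid - 1, j)]) [])

lemma pvPortA_eq (grid : List (List Int)) :
    identifier_zones_bord grid =
      PySem.List.sorted ((pvBord grid).foldl (pvStepA grid) (PySem.Set.empty, PySem.Set.empty)).2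
        (fun p => toLex p) := rfl

lemma pvRA_ok {grid V S x} (h : pvRA grid V S x) : pvOk grid x := by
  cases h with
  | base _ hok _ => exact hok
  | step _ _ hok _ => exact hok

lemma pvOuter (grid : List (List Int)) :
    ∀ (S : List (Int × Int)) (V Z : PySem.Set (Int × Int)),
      (∀ x, x ∈ V ↔ x ∈ Z) → pvClosed grid (fun y => y ∈ V) → Z.Nodup →
      (∀ x, x ∈ (S.foldl (pvStepA grid) (V, Z)).2 ↔ x ∈ Z ∨ pvRA grid pvFalseP S x) ∧
      (S.foldl (pvStepA grid) (V, Z)).2.Nodup := by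
  intro S
  induction S with
  | nil =>
    intro V Z hVZ hcl hZ
    refine ⟨fun x => ⟨Or.inl, ?_⟩, hZ⟩
    rintro (h | h)
    · exact h
    · exact absurd h (fun h => pvRA_nil h)
  | cons p S' ih =>
    intro V Z hVZ hcl hZ
    have hstep : (∀ x, x ∈ (pvStepA grid (V, Z) p).1 ↔ x ∈ V ∨ pvRA grid pvFalseP [p] x) ∧
        (∀ x, x ∈ (pvStepA grid (V, Z) p).2 ↔ x ∈ Z ∨ pvRA grid pvFalseP [p] x) ∧
        (pvStepA grid (V, Z) p).2.Nodup := by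
      unfold pvStepA
      split_ifs with hch
      · have hf := pvFlood_spec grid [p] V PySem.Set.empty
        refine ⟨fun x => ?_, fun x => ?_, ?_⟩
        · rw [hf.2 x]; exact pvRA_absorb hcl
        · simp only [PySem.Set.mem_update]
          rw [hf.1 x]
          have habs := pvRA_absorb (grid := grid) (S := [p]) (x := x) hcl
          have hemp : ¬ (x ∈ (PySem.Set.empty : PySem.Set (Int × Int))) := by
            simp [PySem.Set.empty]
          have hvz := hVZ x
          tauto
        · exact PySem.Set.nodup_update _ _ hZ
      · have hra : ∀ x, pvRA grid pvFalseP [p] x → x ∈ V := by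
          intro x hx
          by_cases hp : p ∈ V
          · refine pvRA_closed_absorbs hcl ?_ hx
            intro s hs
            rw [List.mem_singleton] at hs; subst hs; exact hp
          · have hcell : ¬ pvCell grid p.1 p.2 = some 0 := fun hc => hch ⟨hc, hp⟩
            have : ¬ pvOk grid p ∨ pvFalseP p := Or.inl (fun hok => hcell hok.2.2.2.2)
            rw [pvRA_skip this] at hx
            exact absurd hx (fun h => pvRA_nil h)
        exact ⟨fun x => ⟨Or.inl, fun h => h.elim id (hra x)⟩,
               fun x => ⟨Or.inl, fun h => h.elim id (fun h => (hVZ x).mp (hra x h))⟩, hZ⟩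
    obtain ⟨h1, h2, h3⟩ := hstep
    have hVZ' : ∀ x, x ∈ (pvStepA grid (V, Z) p).1 ↔ x ∈ (pvStepA grid (V, Z) p).2 := by
      intro x; rw [h1 x, h2 x]
      have := hVZ x; tauto
    have hcl' : pvClosed grid (fun y => y ∈ (pvStepA grid (V, Z) p).1) := by
      intro b c hb ha hok
      rw [h1] at hb ⊢
      rcases hb with hb | hb
      · exact Or.inl (hcl _ _ hb ha hok)
      · exact Or.inr (.step hb ha hok (fun h => h))
    have hres := ih (pvStepA grid (V, Z) p).1 (pvStepA grid (V, Z) p).2 hVZ' hcl' h3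
    rw [List.foldl_cons]
    constructor
    · intro x
      rw [hres.1 x, h2 x]
      have happ := pvRA_append (grid := grid) (V := pvFalseP) (S := [p]) (T := S') (x := x)
      rw [List.singleton_append] at happ
      rw [happ]
      tauto
    · exact hres.2

lemma pv_mem_pvBord (grid : List (List Int)) (c : Int × Int) :
    c ∈ pvBord grid ↔
      (∃ j, 0 ≤ j ∧ j < pvCols grid ∧ (c = ((0 : Int), j) ∨ c = (pvRows grid - 1, j))) ∨
      (∃ i, 1 ≤ i ∧ i < pvRows grid - 1 ∧ (c = (i, (0 : Int)) ∨ c = (i, pvCols grid - 1))) := by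
  unfold pvBord
  rw [PySem.List.foldl_append_eq_flatMap, PySem.List.foldl_append_eq_flatMap]
  simp only [List.nil_append, List.mem_append, List.mem_flatMap, PySem.List.mem_pyRange_one,
    List.mem_cons, List.not_mem_nil, or_false]
  constructor
  · rintro (⟨j, hj, h | h⟩ | ⟨i, hi, h | h⟩)
    · exact Or.inl ⟨j, hj.1, hj.2, Or.inl h⟩
    · exact Or.inl ⟨j, hj.1, hj.2, Or.inr h⟩
    · exact Or.inr ⟨i, hi.1, hi.2, Or.inl h⟩
    · exact Or.inr ⟨i, hi.1, hi.2, Or.inr h⟩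
  · rintro (⟨j, hj1, hj2, h | h⟩ | ⟨i, hi1, hi2, h | h⟩)
    · exact Or.inl ⟨j, ⟨hj1, hj2⟩, Or.inl h⟩
    · exact Or.inl ⟨j, ⟨hj1, hj2⟩, Or.inr h⟩
    · exact Or.inr ⟨i, ⟨hi1, hi2⟩, Or.inl h⟩
    · exact Or.inr ⟨i, ⟨hi1, hi2⟩, Or.inr h⟩

lemma pv_pvBord_ok_iff (grid : List (List Int)) {c : Int × Int} (hok : pvOk grid c) :
    c ∈ pvBord grid ↔
      (c.1 = 0 ∨ c.1 = pvRows grid - 1 ∨ c.2 = 0 ∨ c.2 = pvCols grid - 1) := by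
  obtain ⟨a, b⟩ := c
  obtain ⟨h1, h2, h3, h4, -⟩ := hok
  rw [pv_mem_pvBord]
  simp only [Prod.mk.injEq]
  constructor
  · rintro (⟨j, hj1, hj2, (⟨rfl, rfl⟩ | ⟨rfl, rfl⟩)⟩ | ⟨i, hi1, hi2, (⟨rfl, rfl⟩ | ⟨rfl, rfl⟩)⟩) <;>
      simp_all
  · rintro (h | h | h | h)
    · exact Or.inl ⟨b, h3, h4, Or.inl ⟨h, rfl⟩⟩
    · exact Or.inl ⟨b, h3, h4, Or.inr ⟨h, rfl⟩⟩
    · by_cases ha0 : a = 0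
      · exact Or.inl ⟨b, h3, h4, Or.inl ⟨ha0, rfl⟩⟩
      · by_cases har : a = pvRows grid - 1
        · exact Or.inl ⟨b, h3, h4, Or.inr ⟨har, rfl⟩⟩
        · exact Or.inr ⟨a, by omega, by omega, Or.inl ⟨rfl, h⟩⟩
    · by_cases ha0 : a = 0
      · exact Or.inl ⟨b, h3, h4, Or.inl ⟨ha0, rfl⟩⟩
      · by_cases har : a = pvRows grid - 1
        · exact Or.inl ⟨b, h3, h4, Or.inr ⟨har, rfl⟩⟩
        · exact Or.inr ⟨a, by omega, by omega, Or.inr ⟨rfl, h⟩⟩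

lemma pv_mem_sweepInit (grid : List (List Int)) (x : Int × Int) :
    x ∈ pvSweepInit grid ↔
      pvOk grid x ∧ (x.1 = 0 ∨ x.1 = pvRows grid - 1 ∨ x.2 = 0 ∨ x.2 = pvCols grid - 1) := by
  unfold pvSweepInit
  rw [pv_mem_foldl _
    (fun i x => ∃ j ∈ PySem.List.pyRange 0 (pvCols grid) 1,
      (pvCell grid i j = some 0 ∧
        (i = 0 ∨ i = pvRows grid - 1 ∨ j = 0 ∨ j = pvCols grid - 1)) ∧ x = (i, j))
    (fun m i x => pv_mem_foldl _
      (fun j x => (pvCell grid i j = some 0 ∧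
        (i = 0 ∨ i = pvRows grid - 1 ∨ j = 0 ∨ j = pvCols grid - 1)) ∧ x = (i, j))
      (fun m j x => by
        split_ifs with h
        · simp [PySem.Set.mem_add]; tauto
        · simp; tauto) _ m x)]
  simp only [PySem.List.mem_pyRange_one]
  constructor
  · rintro (h | ⟨i, hi, j, hj, ⟨hcell, hbord⟩, rfl⟩)
    · simp [PySem.Set.empty] at h
    · exact ⟨⟨hi.1, hi.2, hj.1, hj.2, hcell⟩, hbord⟩
  · rintro ⟨⟨ho1, ho2, ho3, ho4, hcell⟩, hbord⟩
    exact Or.inr ⟨x.1, ⟨ho1, ho2⟩, x.2, ⟨ho3, ho4⟩, ⟨hcell, hbord⟩, rfl⟩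

lemma pv_mem_sweepAdd (grid : List (List Int)) (M : PySem.Set (Int × Int)) (x : Int × Int) :
    x ∈ pvSweepAdd grid M ↔
      pvOk grid x ∧ x ∉ M ∧ ∃ d, pvAdj x d ∧ d ∈ M := by
  unfold pvSweepAdd
  rw [pv_mem_foldl _
    (fun i x => ∃ j ∈ PySem.List.pyRange 0 (pvCols grid) 1,
      (pvCell grid i j = some 0 ∧ (i, j) ∉ M ∧
        ((i - 1, j) ∈ M ∨ (i + 1, j) ∈ M ∨ (i, j - 1) ∈ M ∨ (i, j + 1) ∈ M)) ∧ x = (i, j))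
    (fun m i x => pv_mem_foldl _
      (fun j x => (pvCell grid i j = some 0 ∧ (i, j) ∉ M ∧
        ((i - 1, j) ∈ M ∨ (i + 1, j) ∈ M ∨ (i, j - 1) ∈ M ∨ (i, j + 1) ∈ M)) ∧ x = (i, j))
      (fun m j x => by
        split_ifs with h
        · simp [PySem.Set.mem_add]; tauto
        · simp; tauto) _ m x)]
  simp only [PySem.List.mem_pyRange_one]
  have hnbr : ∀ i j : Int,
      (((i - 1, j) ∈ M ∨ (i + 1, j) ∈ M ∨ (i, j - 1) ∈ M ∨ (i, j + 1) ∈ M) ↔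
        ∃ d, pvAdj (i, j) d ∧ d ∈ M) := by
    intro i j
    constructor
    · rintro (h | h | h | h)
      · exact ⟨(i - 1, j), Or.inr ⟨rfl, by omega⟩, h⟩
      · exact ⟨(i + 1, j), Or.inr ⟨rfl, by omega⟩, h⟩
      · exact ⟨(i, j - 1), Or.inl ⟨rfl, by omega⟩, h⟩
      · exact ⟨(i, j + 1), Or.inl ⟨rfl, by omega⟩, h⟩
    · rintro ⟨⟨p, q⟩, hadj, hd⟩
      unfold pvAdj at hadj
      simp only at hadj
      rcases hadj with ⟨he, hc | hc⟩ | ⟨he, hc | hc⟩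
      · have hpq : (p, q) = (i, j - 1) := by rw [Prod.mk.injEq]; omega
        rw [hpq] at hd; tauto
      · have hpq : (p, q) = (i, j + 1) := by rw [Prod.mk.injEq]; omega
        rw [hpq] at hd; tauto
      · have hpq : (p, q) = (i - 1, j) := by rw [Prod.mk.injEq]; omega
        rw [hpq] at hd; tauto
      · have hpq : (p, q) = (i + 1, j) := by rw [Prod.mk.injEq]; omega
        rw [hpq] at hd; tauto
  constructor
  · rintro (h | ⟨i, hi, j, hj, ⟨hcell, hnm, hn⟩, rfl⟩)
    · simp [PySem.Set.empty] at h
    · exact ⟨⟨hi.1, hi.2, hj.1, hj.2, hcell⟩, hnm, (hnbr i j).mp hn⟩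
  · rintro ⟨⟨ho1, ho2, ho3, ho4, hcell⟩, hnm, hex⟩
    refine Or.inr ⟨x.1, ⟨ho1, ho2⟩, x.2, ⟨ho3, ho4⟩, ⟨hcell, ?_, (hnbr x.1 x.2).mpr ?_⟩, rfl⟩
    · simpa using hnm
    · simpa using hex

lemma pv_nodup_sweepInit (grid : List (List Int)) : (pvSweepInit grid).Nodup := by
  unfold pvSweepInit
  refine pv_nodup_foldl _ ?_ _ _ (by simp [PySem.Set.empty])
  intro m i hm
  refine pv_nodup_foldl _ ?_ _ _ hm
  intro m' j hm'
  split_ifs with h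
  · exact PySem.Set.nodup_add _ _ hm'
  · exact hm'

lemma pvSaturate_spec (grid : List (List Int)) :
    ∀ (M : PySem.Set (Int × Int)),
      M.Nodup → (∀ x ∈ M, pvRA grid pvFalseP (pvBord grid) x) →
      (∀ c : Int × Int, pvOk grid c →
        (c.1 = 0 ∨ c.1 = pvRows grid - 1 ∨ c.2 = 0 ∨ c.2 = pvCols grid - 1) → c ∈ M) →
      ((∀ x, x ∈ pvSaturate grid M ↔ pvRA grid pvFalseP (pvBord grid) x) ∧
        (pvSaturate grid M).Nodup) := by
  intro M
  fun_induction pvSaturate grid M with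
  | case1 M added heq =>
    intro hnd hsub hbase
    refine ⟨fun x => ⟨fun hx => hsub x hx, fun hx => ?_⟩, hnd⟩
    induction hx with
    | base hc hok _ => exact hbase _ hok ((pv_pvBord_ok_iff grid hok).mp hc)
    | @step b c hb ha hok _ ih =>
      by_cases hcM : c ∈ M
      · exact hcM
      · exfalso
        have hadd : c ∈ pvSweepAdd grid M :=
          (pv_mem_sweepAdd grid M c).mpr ⟨hok, hcM, b, pvAdj_symm ha, ih⟩
        rw [show pvSweepAdd grid M = [] from heq] at hadd
        simp at hadd
  | case2 M added hne ih =>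
    intro hnd hsub hbase
    apply ih
    · exact PySem.Set.nodup_union _ _ hnd
    · intro x hx
      rw [PySem.Set.mem_union] at hx
      rcases hx with hx | hx
      · exact hsub x hx
      · obtain ⟨hok, -, d, hadj, hdM⟩ := (pv_mem_sweepAdd grid M x).mp hx
        exact .step (hsub d hdM) (pvAdj_symm hadj) hok (fun h => h)
    · intro c hok hbord
      exact (PySem.Set.mem_union _ _ _).mpr (Or.inl (hbase c hok hbord))

lemma pv_B_set (grid : List (List Int)) :
    (∀ x, x ∈ pvSaturate grid (pvSweepInit grid) ↔ pvRA grid pvFalseP (pvBord grid) x) ∧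
      (pvSaturate grid (pvSweepInit grid)).Nodup := by
  apply pvSaturate_spec grid (pvSweepInit grid) (pv_nodup_sweepInit grid)
  · intro x hx
    obtain ⟨hok, hbord⟩ := (pv_mem_sweepInit grid x).mp hx
    exact .base ((pv_pvBord_ok_iff grid hok).mpr hbord) hok (fun h => h)
  · intro c hok hbord
    exact (pv_mem_sweepInit grid c).mpr ⟨hok, hbord⟩

lemma pv_A_set (grid : List (List Int)) :
    (∀ x, x ∈ ((pvBord grid).foldl (pvStepA grid) (PySem.Set.empty, PySem.Set.empty)).2 ↔
        pvRA grid pvFalseP (pvBord grid) x) ∧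
      ((pvBord grid).foldl (pvStepA grid) (PySem.Set.empty, PySem.Set.empty)).2.Nodup := by
  have h := pvOuter grid (pvBord grid) PySem.Set.empty PySem.Set.empty
    (fun x => by simp [PySem.Set.empty])
    (fun b c hb => by simp [PySem.Set.empty] at hb)
    (by simp [PySem.Set.empty])
  refine ⟨fun x => ?_, h.2⟩
  rw [h.1 x]
  simp [PySem.Set.empty]

lemma pv_pairwise_pvAll (grid : List (List Int)) :
    (pvAll grid).Pairwise (fun a b => (toLex a : Lex (Int × Int)) < toLex b) := by
  unfold pvAll
  rw [List.pairwise_flatMap]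
  constructor
  · intro i _
    rw [List.pairwise_map]
    refine (PySem.List.pairwise_lt_pyRange_one 0 (pvCols grid)).imp ?_
    intro a b hab
    rw [Prod.Lex.lt_iff]
    exact Or.inr ⟨rfl, hab⟩
  · refine (PySem.List.pairwise_lt_pyRange_one 0 (pvRows grid)).imp ?_
    intro a b hab x hx y hy
    simp only [List.mem_map] at hx hy
    obtain ⟨j1, -, rfl⟩ := hx
    obtain ⟨j2, -, rfl⟩ := hy
    rw [Prod.Lex.lt_iff]
    exact Or.inl hab

-- ===== VERDICT =====
theorem identifier_zones_bord_spec : Claim_equal_identifier_zones_bord := by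
  intro grid _ _
  unfold Spec_identifier_zones_bord
  rw [pvPortA_eq]
  unfold identifier_zones_bord_alt
  obtain ⟨hAmem, hAnd⟩ := pv_A_set grid
  obtain ⟨hBmem, hBnd⟩ := pv_B_set grid
  set B := pvSaturate grid (pvSweepInit grid) with hB
  set canon := (pvAll grid).filter (fun c => decide (c ∈ B)) with hcanon
  have hpw : canon.Pairwise (fun a b => (toLex a : Lex (Int × Int)) < toLex b) :=
    (pv_pairwise_pvAll grid).filter _
  have hcnd : canon.Nodup := hpw.imp (fun {a b} hlt he => by subst he; exact lt_irrefl _ hlt)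
  have hcmem : ∀ x, x ∈ canon ↔ pvRA grid pvFalseP (pvBord grid) x := by
    intro x
    rw [hcanon, List.mem_filter]
    simp only [decide_eq_true_eq]
    constructor
    · rintro ⟨-, hx⟩; exact (hBmem x).mp hx
    · intro hx
      refine ⟨?_, (hBmem x).mpr hx⟩
      have hok := pvRA_ok hx
      exact (pv_mem_pvAll grid x).mpr ⟨hok.1, hok.2.1, hok.2.2.1, hok.2.2.2.1⟩
  have hpermA : canon.Perm ((pvBord grid).foldl (pvStepA grid) (PySem.Set.empty, PySem.Set.empty)).2 :=
    (List.perm_ext_iff_of_nodup hcnd hAnd).mpr (fun a => (hcmem a).trans (hAmem a).symm)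
  have hpermB : canon.Perm B :=
    (List.perm_ext_iff_of_nodup hcnd hBnd).mpr (fun a => (hcmem a).trans (hBmem a).symm)
  rw [PySem.List.sorted_eq_of_perm_of_pairwise_lt _ canon _ hpermA hpw,
    PySem.List.sorted_eq_of_perm_of_pairwise_lt _ canon _ hpermB hpw]
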